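-- pv_equiv track=rewrite | github.com/pypi-data/pypi-mirror-369 | packages/duosubs/duosubs-1.0.1-py3-none-any.whl/duosubs/core/merger.py | _generate_all_consecutive_combinations
-- ===== SOURCE A (Python) =====
-- def _generate_all_consecutive_combinations(
--         tokens: list[str],
--         start_index: int,
--         end_index: int
--     ) -> tuple[list[str],list[tuple[int,int]]]:
--     """
--     Generates all consecutive combinations of tokens within a specified range of
--     region of interest.
--
--     Args:
--         tokens (list[str]): List of tokens.
--         start_index (int): Start index of the specified range.
--         end_index (int): End index of the specified range.
--
--     Returns:
--         tuple[list[str],list[tuple[int,int]]]: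
--         - List of combined token strings.
--         - Tuple containing the start and end indices of the combined tokens.
--     """
--     combos = []
--     indices_combos = []
--     sliced_tokens = tokens[start_index:end_index]
--     max_size = len(sliced_tokens)
--
--     for i in range(max_size):
--         for j in range(1, max_size + 1):
--             if i + j <= max_size:
--                 combined = " ".join(sliced_tokens[i:i + j]).replace("\\N","")
--                 combos.append(combined)
--                 indices_combos.append((start_index+i, start_index+i+j))
--
--     return combos, indices_combos
-- ===== SOURCE B (Python) =====
-- def _generate_all_consecutive_combinations(
--         tokens: list[str],
--         start_index: int,
--         end_index: int
--     ) -> tuple[list[str], list[tuple[int, int]]]: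
--     # Different decomposition: for each start offset i, grow one running string
--     # token by token instead of re-joining a fresh slice for every (i, j) pair,
--     # and iterate the end position directly instead of guarding lengths.
--     sliced = tokens[start_index:end_index]
--     combos = []
--     indices = []
--     for i in range(len(sliced)):
--         acc = ""
--         for k in range(i, len(sliced)):
--             acc = sliced[k] if k == i else acc + " " + sliced[k]
--             combos.append(acc.replace("\\N", ""))
--             indices.append((start_index + i, start_index + k + 1))
--     return combos, indices
-- ===== Notes on version B (the rewrite author's own statement) =====
-- stated objective: alternative
-- what changed: Instead of re-joining (and re-slicing) a fresh token slice for every (start, length) pair behind a length guard, B iterates the end position directly and threads a running string per start offset, extending it by one token at a time.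
import Mathlib
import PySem

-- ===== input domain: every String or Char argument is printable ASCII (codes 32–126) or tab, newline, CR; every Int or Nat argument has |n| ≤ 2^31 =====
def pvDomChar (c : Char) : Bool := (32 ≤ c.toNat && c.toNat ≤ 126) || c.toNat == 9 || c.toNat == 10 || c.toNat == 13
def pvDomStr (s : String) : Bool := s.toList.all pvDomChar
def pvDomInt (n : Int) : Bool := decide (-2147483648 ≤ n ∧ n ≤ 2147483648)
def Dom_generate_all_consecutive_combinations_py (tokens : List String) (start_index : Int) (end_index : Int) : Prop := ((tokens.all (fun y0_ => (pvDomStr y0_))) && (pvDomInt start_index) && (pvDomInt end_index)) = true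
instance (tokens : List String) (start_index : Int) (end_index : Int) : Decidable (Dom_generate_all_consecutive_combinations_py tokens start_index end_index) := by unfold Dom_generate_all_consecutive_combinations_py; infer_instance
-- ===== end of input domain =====

-- B replaces A's per-pair slice-and-rejoin (and its length guard) by a running
-- string grown one token at a time per start offset (objective: alternative decomposition).

-- ===== PORT A =====
def generate_all_consecutive_combinations_py (tokens : List String) (start_index : Int) (end_index : Int) : List String × (List (Int × Int)) :=
  let sliced_tokens := PySem.List.slice tokens (some start_index) (some end_index)
  let max_size : Int := sliced_tokens.length
  (PySem.List.pyRange 0 max_size).foldl (fun st i =>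
    (PySem.List.pyRange 1 (max_size + 1)).foldl (fun st2 j =>
      if i + j ≤ max_size then
        let combined := PySem.Str.replace (PySem.Str.join " " (PySem.List.slice sliced_tokens (some i) (some (i + j)))) "\\N" ""
        (st2.1 ++ [combined], st2.2 ++ [(start_index + i, start_index + i + j)])
      else st2) st) ([], [])

-- ===== PORT B =====
def generate_all_consecutive_combinations_py_alt (tokens : List String) (start_index : Int) (end_index : Int) : List String × (List (Int × Int)) :=
  let sliced := PySem.List.slice tokens (some start_index) (some end_index)
  let n : Int := sliced.length
  ((PySem.List.pyRange 0 n).foldl (fun st i =>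
      let inner := (PySem.List.pyRange i n).foldl
        (fun (st2 : String × List String × List (Int × Int)) k =>
          let acc := if k == i then PySem.List.pyGetD sliced k "" else st2.1 ++ " " ++ PySem.List.pyGetD sliced k ""
          (acc, st2.2.1 ++ [PySem.Str.replace acc "\\N" ""], st2.2.2 ++ [(start_index + i, start_index + k + 1)]))
        ("", st.1, st.2)
      (inner.2.1, inner.2.2)) ([], []))

-- ===== PRECONDITION & SPEC =====
def Spec_generate_all_consecutive_combinations_py (tokens : List String) (start_index : Int) (end_index : Int) (out : List String × (List (Int × Int))) : Prop := out = generate_all_consecutive_combinations_py_alt tokens start_index end_index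
instance (tokens : List String) (start_index : Int) (end_index : Int) (out : List String × (List (Int × Int))) : Decidable (Spec_generate_all_consecutive_combinations_py tokens start_index end_index out) := by unfold Spec_generate_all_consecutive_combinations_py; infer_instance

-- ===== CLAIM (what is proved, stated in full; the proofs are below) =====
def Claim_equal_generate_all_consecutive_combinations_py : Prop := ∀ (tokens : List String) (start_index : Int) (end_index : Int), Dom_generate_all_consecutive_combinations_py tokens start_index end_index → Spec_generate_all_consecutive_combinations_py tokens start_index end_index (generate_all_consecutive_combinations_py tokens start_index end_index)

-- ===== LEMMAS AND PROOFS =====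

-- Canonical value both ports are shown to compute: for each start offset i the
-- row of combined strings / index pairs, all rows concatenated.
def pvCmb (L : List String) (i len : Nat) : String :=
  PySem.Str.replace (PySem.Str.join " " ((L.drop i).take len)) "\\N" ""

def pvRowC (L : List String) (i : Nat) : List String :=
  (List.range (L.length - i)).map (fun t => pvCmb L i (t + 1))

def pvRowP (s : Int) (n i : Nat) : List (Int × Int) :=
  (List.range (n - i)).map (fun (t : Nat) => ((s + i : Int), (s + i + t + 1 : Int)))

def pvOut (L : List String) (s : Int) : List String × List (Int × Int) :=
  ((List.range L.length).flatMap (fun i => pvRowC L i),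
   (List.range L.length).flatMap (fun i => pvRowP s L.length i))

theorem pv_join_one (x : String) : PySem.Str.join " " [x] = x := by
  apply String.toList_inj.mp
  simp [PySem.Str.toList_join, PySem.Chars.join_singleton]

theorem pv_join_snoc (xs : List String) (x : String) (h : xs ≠ []) :
    PySem.Str.join " " (xs ++ [x]) = PySem.Str.join " " xs ++ " " ++ x := by
  apply String.toList_inj.mp
  simp only [PySem.Str.toList_join, String.toList_append, List.map_append, List.map_cons, List.map_nil]
  induction xs with
  | nil => simp at h
  | cons a tl ih =>
    cases tl with
    | nil => simp [PySem.Chars.join_singleton, PySem.Chars.join_cons_cons]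
    | cons b tl2 =>
      simp only [List.map_cons, List.cons_append, PySem.Chars.join_cons_cons] at *
      rw [ih (by simp)]
      simp

-- A's inner loop over j appends exactly the (truncated) row for start offset iN.
theorem pvA_inner (L : List String) (s : Int) (iN : Nat) (m : Nat) (hm : m ≤ L.length)
    (st : List String × List (Int × Int)) :
    (PySem.List.pyRange 1 ((m : Int) + 1)).foldl (fun st2 j =>
      if (iN : Int) + j ≤ (L.length : Int) then
        (st2.1 ++ [PySem.Str.replace (PySem.Str.join " " (PySem.List.slice L (some (iN : Int)) (some ((iN : Int) + j)))) "\\N" ""],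
         st2.2 ++ [(s + (iN : Int), s + (iN : Int) + j)])
      else st2) st
    = (st.1 ++ (List.range (min m (L.length - iN))).map (fun t => pvCmb L iN (t + 1)),
       st.2 ++ (List.range (min m (L.length - iN))).map (fun (t : Nat) => ((s + iN : Int), (s + iN + t + 1 : Int)))) := by
  induction m with
  | zero => simp [PySem.List.pyRange]
  | succ m ih =>
    have h1 : ((m + 1 : Nat) : Int) + 1 = ((m : Int) + 1) + 1 := by push_cast; ring
    rw [h1, PySem.List.pyRange_one_succ_right (by omega), List.foldl_append,
        ih (by omega)]
    simp only [List.foldl_cons, List.foldl_nil]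
    by_cases hc : iN + (m + 1) ≤ L.length
    · have hc' : (iN : Int) + ((m : Int) + 1) ≤ (L.length : Int) := by push_cast; omega
      rw [if_pos hc']
      have hsl : (iN : Int) + ((m : Int) + 1) = ((iN + m + 1 : Nat) : Int) := by push_cast; ring
      have hmin1 : min (m + 1) (L.length - iN) = m + 1 := by omega
      have hmin2 : min m (L.length - iN) = m := by omega
      rw [hmin1, hmin2, List.range_succ]
      simp only [List.map_append, List.map_cons, List.map_nil, ← List.append_assoc, Prod.mk.injEq]
      constructor
      · rw [hsl, PySem.List.slice_natCast, show iN + m + 1 - iN = m + 1 from by omega]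
        simp [pvCmb]
      · congr 3; push_cast; ring
    · have hc' : ¬ ((iN : Int) + ((m : Int) + 1) ≤ (L.length : Int)) := by push_cast; omega
      rw [if_neg hc']
      have : min (m + 1) (L.length - iN) = min m (L.length - iN) := by omega
      rw [this]

-- B's inner loop over k: running accumulator + the appended row for offset iN.
theorem pvB_inner (L : List String) (s : Int) (iN m : Nat) (him : iN ≤ m) (hm : m ≤ L.length)
    (c0 : List String) (d0 : List (Int × Int)) :
    (PySem.List.pyRange (iN : Int) (m : Int)).foldl
      (fun (st2 : String × List String × List (Int × Int)) k =>
        let acc := if k == (iN : Int) then PySem.List.pyGetD L k "" else st2.1 ++ " " ++ PySem.List.pyGetD L k ""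
        (acc, st2.2.1 ++ [PySem.Str.replace acc "\\N" ""], st2.2.2 ++ [(s + (iN : Int), s + k + 1)]))
      ("", c0, d0)
    = ((if m = iN then "" else PySem.Str.join " " ((L.drop iN).take (m - iN))),
       c0 ++ (List.range (m - iN)).map (fun t => pvCmb L iN (t + 1)),
       d0 ++ (List.range (m - iN)).map (fun (t : Nat) => ((s + iN : Int), (s + iN + t + 1 : Int)))) := by
  induction m, him using Nat.le_induction with
  | base => simp [PySem.List.pyRange]
  | succ m him ih =>
    have h1 : ((m + 1 : Nat) : Int) = (m : Int) + 1 := by push_cast; ring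
    rw [h1, PySem.List.pyRange_one_succ_right (by omega), List.foldl_append, ih (by omega)]
    simp only [List.foldl_cons, List.foldl_nil]
    have hmlt : m < L.length := by omega
    have hget : PySem.List.pyGetD L ((m : Nat) : Int) "" = L[m] := by
      rw [PySem.List.pyGetD_natCast, List.getD_eq_getElem L "" hmlt]
    by_cases hmi : m = iN
    · subst hmi
      have hb : (((m:Nat):Int) == ((m:Nat):Int)) = true := by simp
      have hdrop : L.drop m = L[m] :: L.drop (m+1) := List.drop_eq_getElem_cons hmlt
      have htake : (L.drop m).take 1 = [L[m]] := by rw [hdrop]; rfl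
      simp only [hb, if_true, Nat.sub_self, List.range_zero, List.map_nil, List.append_nil,
                 show m + 1 - m = 1 from by omega, if_neg (show ¬ m + 1 = m from by omega),
                 htake, pv_join_one, List.range_one, List.map_cons, List.map_nil, hget,
                 Prod.mk.injEq]
      refine ⟨trivial, ?_, ?_⟩
      · simp [pvCmb, htake, pv_join_one, show (0:Nat) + 1 = 1 from rfl]
      · simp
    · have hb : (((m:Nat):Int) == ((iN:Nat):Int)) = false := by
        simp only [beq_eq_false_iff_ne, ne_eq, Int.natCast_inj]
        omega
      have hlt : iN < m := by omega
      simp only [hb, Bool.false_eq_true, if_false, if_neg hmi]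
      have hne : (L.drop iN).take (m - iN) ≠ [] := by
        apply List.ne_nil_of_length_pos
        simp only [List.length_take, List.length_drop]
        omega
      have hidx : (L.drop iN)[m - iN]? = some L[m] := by
        rw [List.getElem?_drop, show iN + (m - iN) = m from by omega,
            List.getElem?_eq_getElem hmlt]
      have htake : (L.drop iN).take (m + 1 - iN) = (L.drop iN).take (m - iN) ++ [L[m]] := by
        rw [show m + 1 - iN = (m - iN) + 1 from by omega, List.take_add_one, hidx]
        rfl
      have hacc : PySem.Str.join " " ((L.drop iN).take (m - iN)) ++ " " ++ PySem.List.pyGetD L ((m:Nat):Int) ""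
          = PySem.Str.join " " ((L.drop iN).take (m + 1 - iN)) := by
        rw [hget, htake, pv_join_snoc _ _ hne]
      rw [hacc, if_neg (show ¬ m + 1 = iN from by omega),
          show m + 1 - iN = (m - iN) + 1 from by omega, List.range_succ]
      simp only [List.map_append, List.map_cons, List.map_nil, ← List.append_assoc, Prod.mk.injEq]
      refine ⟨trivial, ?_, ?_⟩
      · simp only [pvCmb]
      · have h2 : (s + (iN:Int) + ((m - iN : Nat):Int) + 1) = s + ((m:Nat):Int) + 1 := by
          push_cast [Nat.cast_sub (le_of_lt hlt)]
          ring
        rw [h2]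

theorem pvA_eq (tokens : List String) (s e : Int) :
    generate_all_consecutive_combinations_py tokens s e
      = pvOut (PySem.List.slice tokens (some s) (some e)) s := by
  unfold generate_all_consecutive_combinations_py
  set L := PySem.List.slice tokens (some s) (some e) with hL
  simp only [PySem.List.pyRange_zero_natCast, List.foldl_map]
  rw [PySem.List.foldl_congr_mem (List.range L.length) _
        (fun st (i : Nat) => (st.1 ++ pvRowC L i, st.2 ++ pvRowP s L.length i)) ([], [])
        (by
          intro st i hi
          rw [pvA_inner L s i L.length le_rfl st,
              min_eq_right (Nat.sub_le _ _)]
          rfl)]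
  rw [PySem.List.foldl_prod_mk (fun c i => c ++ pvRowC L i) (fun d i => d ++ pvRowP s L.length i)]
  rw [PySem.List.foldl_append_eq_flatMap, PySem.List.foldl_append_eq_flatMap]
  rfl

theorem pvB_eq (tokens : List String) (s e : Int) :
    generate_all_consecutive_combinations_py_alt tokens s e
      = pvOut (PySem.List.slice tokens (some s) (some e)) s := by
  unfold generate_all_consecutive_combinations_py_alt
  set L := PySem.List.slice tokens (some s) (some e) with hL
  simp only [PySem.List.pyRange_zero_natCast, List.foldl_map]
  rw [PySem.List.foldl_congr_mem (List.range L.length) _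
        (fun st (i : Nat) => (st.1 ++ pvRowC L i, st.2 ++ pvRowP s L.length i)) ([], [])
        (by
          intro st i hi
          have hi' : i ≤ L.length := le_of_lt (List.mem_range.mp hi)
          rw [pvB_inner L s i L.length hi' le_rfl st.1 st.2]
          rfl)]
  rw [PySem.List.foldl_prod_mk (fun c i => c ++ pvRowC L i) (fun d i => d ++ pvRowP s L.length i)]
  rw [PySem.List.foldl_append_eq_flatMap, PySem.List.foldl_append_eq_flatMap]
  rfl

-- ===== VERDICT (by name: the statement is the Claim_ definition above) =====
theorem generate_all_consecutive_combinations_py_spec : Claim_equal_generate_all_consecutive_combinations_py := by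
  intro tokens s e _
  show _ = _
  rw [pvA_eq, pvB_eq]
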